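-- pv_equiv track=rewrite | github.com/anuj2001310/Leetcode- | 3581-count-odd-letters-from-number/3581-count-odd-letters-from-number.py | countOddLetters
-- ===== SOURCE A (Python) =====
-- def countOddLetters(n: int) -> int:
--     arr = [
--         "zero",
--         "one",
--         "two",
--         "three",
--         "four",
--         "five",
--         "six",
--         "seven",
--         "eight",
--         "nine",
--     ]
--     freq = [0 for _ in range(26)]
--
--     while n:
--         r = n % 10
--
--         for ch in arr[r]:
--             freq[ord(ch) - 97] += 1
--
--         n //= 10
--
--     return sum(1 for i in range(26) if freq[i] & 1)
-- ===== SOURCE B (Python) =====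
-- _ARR = [
--     "zero",
--     "one",
--     "two",
--     "three",
--     "four",
--     "five",
--     "six",
--     "seven",
--     "eight",
--     "nine",
-- ]
--
-- # 26-bit parity bitmask of each spelling (bit i set <=> letter chr(97+i) occurs an odd number of times)
-- _MASKS = []
-- for _w in _ARR:
--     _m = 0
--     for _ch in _w:
--         _m ^= 1 << (ord(_ch) - 97)
--     _MASKS.append(_m)
--
--
-- def countOddLetters(n: int) -> int:
--     # XOR-fold the per-digit parity masks, then popcount the combined mask
--     m = 0
--     while n:
--         m ^= _MASKS[n % 10]
--         n //= 10
--     c = 0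
--     while m:
--         c += m & 1
--         m >>= 1
--     return c
-- ===== Notes on version B (the rewrite author's own statement) =====
-- stated objective: alternative
-- what changed: Replaces A's per-character counting into a per-letter frequency array plus a final parity scan over all slots by a precomputed per-digit parity bitmask table XOR-folded over the digits, finished with a popcount of the combined mask, so no per-character work happens per call.
import Mathlib
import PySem

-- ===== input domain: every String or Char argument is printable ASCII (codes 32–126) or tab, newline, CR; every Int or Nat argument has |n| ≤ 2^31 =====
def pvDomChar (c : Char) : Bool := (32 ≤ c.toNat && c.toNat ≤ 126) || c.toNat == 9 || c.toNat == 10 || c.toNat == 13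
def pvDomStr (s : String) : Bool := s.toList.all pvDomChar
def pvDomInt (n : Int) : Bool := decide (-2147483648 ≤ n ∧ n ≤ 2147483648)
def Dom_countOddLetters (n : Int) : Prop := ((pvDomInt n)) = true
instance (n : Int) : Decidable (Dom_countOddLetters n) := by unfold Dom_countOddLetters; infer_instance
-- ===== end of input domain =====

-- B replaces A's per-character frequency counting (26-slot array + final parity scan)
-- by a table of precomputed per-digit parity bitmasks XOR-folded over the digits,
-- finished with a popcount of the combined mask ("alternative").

-- ===== PORT A =====
def pvSpell : List String :=
  ["zero", "one", "two", "three", "four", "five", "six", "seven", "eight", "nine"]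

-- freq[ord(ch)-97] += 1 (index always in range 0..25 for the lowercase spellings)
def pvBumpA (freq : List Int) (c : Char) : List Int :=
  PySem.List.pySetD freq ((c.toNat : Int) - 97)
    (PySem.List.pyGetD freq ((c.toNat : Int) - 97) 0 + 1)

-- 'while n:' — for n < 0 the Python loops forever (no input on which A returns is lost); the port stops there
def pvLoopA (n : Int) (freq : List Int) : List Int :=
  if h : 0 < n then
    pvLoopA (PySem.Int.floordiv n 10)
      ((PySem.List.pyGetD pvSpell (PySem.Int.mod n 10) "").toList.foldl pvBumpA freq)
  else freq
termination_by n.toNat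
decreasing_by
  have h10 : PySem.Int.floordiv n 10 = n / 10 := PySem.Int.floordiv_eq_ediv_of_pos (by omega)
  have : n / 10 < n := by omega
  have h0 : 0 ≤ n / 10 := by omega
  omega

def countOddLetters (n : Int) : Int :=
  let freq := pvLoopA n (List.replicate 26 0)
  -- sum(1 for i in range(26) if freq[i] & 1): 'freq[i] & 1' is truthy iff ≠ 0
  ((PySem.List.pyRange 0 26 1).map
    (fun i => if PySem.Int.band (PySem.List.pyGetD freq i 0) 1 ≠ 0 then (1 : Int) else 0)).sum

-- ===== PORT B =====
-- module-level table: _MASKS[d] = XOR over the chars of _ARR[d] of 1 << (ord(ch)-97)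
def pvMasks : List Int :=
  pvSpell.map (fun w => w.toList.foldl (fun m c => PySem.Int.bxor m ((1 : Int) <<< (c.toNat - 97))) 0)

-- 'while n: m ^= _MASKS[n % 10]; n //= 10' — same non-termination caveat, stopped at n ≤ 0
def pvLoopB (n : Int) (m : Int) : Int :=
  if h : 0 < n then
    pvLoopB (PySem.Int.floordiv n 10) (PySem.Int.bxor m (PySem.List.pyGetD pvMasks (PySem.Int.mod n 10) 0))
  else m
termination_by n.toNat
decreasing_by
  have h10 : PySem.Int.floordiv n 10 = n / 10 := PySem.Int.floordiv_eq_ediv_of_pos (by omega)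
  have : n / 10 < n := by omega
  have h0 : 0 ≤ n / 10 := by omega
  omega

-- 'while m: c += m & 1; m >>= 1'
def pvPop (m : Int) (c : Int) : Int :=
  if h : 0 < m then pvPop (m >>> (1 : Nat)) (c + PySem.Int.band m 1) else c
termination_by m.toNat
decreasing_by
  have hs := Int.shiftRight_eq_div_pow m 1
  norm_num at hs
  rw [hs]
  omega

def countOddLetters_alt (n : Int) : Int :=
  pvPop (pvLoopB n 0) 0

-- ===== PRECONDITION & SPEC =====
def Spec_countOddLetters (n : Int) (out : Int) : Prop := out = countOddLetters_alt n
instance (n : Int) (out : Int) : Decidable (Spec_countOddLetters n out) := by unfold Spec_countOddLetters; infer_instance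

-- ===== CLAIM (what is proved, stated in full; the proofs are below) =====
def Claim_equal_countOddLetters : Prop := ∀ (n : Int), Dom_countOddLetters n → Spec_countOddLetters n (countOddLetters n)

-- ===== LEMMAS AND PROOFS =====

-- the Nat-level parity mask of a character list (bit i ↔ letter 97+i occurs oddly)
def pvNatMask : List Char → Nat
  | [] => 0
  | c :: cs => (1 <<< (c.toNat - 97)) ^^^ pvNatMask cs

-- Invariant tying A's frequency array to B's running bitmask
def pvInv (freq : List Int) (m : Nat) : Prop :=
  freq.length = 26 ∧
  (∀ i : Nat, i < 26 → 0 ≤ freq.getD i 0) ∧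
  (∀ i : Nat, i < 26 → ((freq.getD i 0) % 2 = 1 ↔ m.testBit i)) ∧
  m < 2 ^ 26

theorem pvGetD_set (l : List Int) (i j : Nat) (v : Int) (h : i < l.length) :
    (l.set i v).getD j 0 = if j = i then v else l.getD j 0 := by
  simp [List.getD]
  rw [List.getElem?_set]
  split <;> rename_i he
  · subst he; simp
  · split <;> simp_all

theorem pvGetD_replicate (i : Nat) (h : i < 26) : (List.replicate 26 (0:Int)).getD i 0 = 0 := by
  rw [List.getD_eq_getElem _ _ (by simpa using h)]
  exact List.getElem_replicate ..

theorem pvInv_init : pvInv (List.replicate 26 0) 0 := by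
  refine ⟨by simp, ?_, ?_, by norm_num⟩ <;>
    intro i hi <;> rw [pvGetD_replicate i hi] <;> simp

-- one character: A bumps freq[ord c - 97], B's mask gets bit (ord c - 97) flipped
theorem pvStep (freq : List Int) (m : Nat) (c : Char)
    (hc1 : 97 ≤ c.toNat) (hc2 : c.toNat < 123) (h : pvInv freq m) :
    pvInv (pvBumpA freq c) (m ^^^ (1 <<< (c.toNat - 97))) := by
  obtain ⟨hlen, hpos, hpar, hlt26⟩ := h
  have hidx : ((c.toNat : Int) - 97) = ((c.toNat - 97 : Nat) : Int) := by omega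
  have hlt : c.toNat - 97 < freq.length := by omega
  have hA : pvBumpA freq c = freq.set (c.toNat - 97) (freq.getD (c.toNat - 97) 0 + 1) := by
    unfold pvBumpA
    rw [hidx, PySem.List.pyGetD_natCast, PySem.List.pySetD_natCast]
  have hbit : ∀ i : Nat, (m ^^^ (1 <<< (c.toNat - 97))).testBit i
      = ((m.testBit i) ^^ (decide (c.toNat - 97 = i))) := by
    intro i
    rw [Nat.testBit_xor, Nat.shiftLeft_eq, one_mul, Nat.testBit_two_pow]
  refine ⟨by rw [hA]; simpa using hlen, ?_, ?_, ?_⟩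
  · intro i hi
    rw [hA, pvGetD_set _ _ _ _ hlt]
    split
    · have := hpos (c.toNat - 97) (by omega); omega
    · exact hpos i hi
  · intro i hi
    rw [hA, pvGetD_set _ _ _ _ hlt, hbit]
    by_cases hic : i = c.toNat - 97
    · have h1 := hpar i hi
      have hp := hpos i hi
      subst hic
      rw [if_pos rfl]
      have hd : decide (c.toNat - 97 = c.toNat - 97) = true := by simp
      rw [hd, Bool.xor_true]
      by_cases hb : m.testBit (c.toNat - 97) <;> simp [hb] at h1 ⊢ <;> omega
    · rw [if_neg hic, decide_eq_false (fun hh => hic hh.symm)]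
      simpa using hpar i hi
  · refine Nat.xor_lt_two_pow hlt26 ?_
    rw [Nat.shiftLeft_eq, one_mul]
    exact Nat.pow_lt_pow_right (by norm_num) (by omega)

theorem pvFold (cs : List Char) (freq : List Int) (m : Nat)
    (hcs : ∀ c ∈ cs, 97 ≤ c.toNat ∧ c.toNat < 123) (h : pvInv freq m) :
    pvInv (cs.foldl pvBumpA freq) (m ^^^ pvNatMask cs) := by
  induction cs generalizing freq m with
  | nil => simpa [pvNatMask] using h
  | cons c cs ih =>
    simp only [List.foldl_cons, pvNatMask]
    have hc := hcs c (by simp)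
    rw [← Nat.xor_assoc]
    exact ih _ _ (fun c' hc' => hcs c' (List.mem_cons_of_mem _ hc')) (pvStep freq m c hc.1 hc.2 h)

set_option maxRecDepth 8192 in
theorem pvSpellCharsB (r : Int) (h0 : 0 ≤ r) (h10 : r < 10) :
    ((PySem.List.pyGetD pvSpell r "").toList.all (fun c => 97 ≤ c.toNat && c.toNat < 123)) = true := by
  interval_cases r <;> decide

theorem pvSpellChars (r : Int) (h0 : 0 ≤ r) (h10 : r < 10) :
    ∀ c ∈ (PySem.List.pyGetD pvSpell r "").toList, 97 ≤ c.toNat ∧ c.toNat < 123 := by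
  intro c hc
  have h := List.all_eq_true.mp (pvSpellCharsB r h0 h10) c hc
  simp at h; exact h

-- the precomputed table entry for digit r is the Nat-level mask of its spelling
set_option maxRecDepth 8192 in
theorem pvMasks_eq (r : Int) (h0 : 0 ≤ r) (h10 : r < 10) :
    PySem.List.pyGetD pvMasks r 0
      = ((pvNatMask (PySem.List.pyGetD pvSpell r "").toList : Nat) : Int) := by
  interval_cases r <;> decide

theorem pvLoop (k : Nat) (n : Int) (hk : n.toNat ≤ k) (freq : List Int) (m : Nat)
    (h : pvInv freq m) :
    ∃ m' : Nat, pvLoopB n (m : Int) = (m' : Int) ∧ pvInv (pvLoopA n freq) m' := by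
  induction k generalizing n freq m with
  | zero =>
    have hn : ¬ 0 < n := by omega
    rw [pvLoopA, pvLoopB, dif_neg hn, dif_neg hn]; exact ⟨m, rfl, h⟩
  | succ k ih =>
    rw [pvLoopA, pvLoopB]
    by_cases hn : 0 < n
    · rw [dif_pos hn, dif_pos hn]
      have hd : PySem.Int.floordiv n 10 = n / 10 := PySem.Int.floordiv_eq_ediv_of_pos (by omega)
      have hm0 : 0 ≤ PySem.Int.mod n 10 := PySem.Int.mod_nonneg _ (by omega)
      have hm10 : PySem.Int.mod n 10 < 10 := PySem.Int.mod_lt _ (by omega)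
      rw [pvMasks_eq _ hm0 hm10, PySem.Int.bxor_natCast]
      exact ih _ (by omega) _ _ (pvFold _ _ _ (pvSpellChars _ hm0 hm10) h)
    · rw [dif_neg hn, dif_neg hn]; exact ⟨m, rfl, h⟩

-- popcount loop: pvPop on ↑m sums the bits of m below any 2^k bound
theorem pvPop_eq (k : Nat) (m : Nat) (hk : m < 2 ^ k) (c : Int) :
    pvPop (m : Int) c
      = c + ((List.range k).map (fun i => if m.testBit i then (1 : Int) else 0)).sum := by
  induction k generalizing m c with
  | zero =>
    have hm : m = 0 := by omega
    subst hm
    rw [pvPop, dif_neg (by norm_num)]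
    simp
  | succ k ih =>
    by_cases hm : m = 0
    · subst hm
      rw [pvPop, dif_neg (by norm_num)]
      simp
    · rw [pvPop, dif_pos (by exact_mod_cast Nat.pos_of_ne_zero hm)]
      have hs : (m : Int) >>> (1 : Nat) = ((m / 2 : Nat) : Int) := by
        rw [Int.shiftRight_eq_div_pow, ← Int.natCast_div]
      have hb : PySem.Int.band (m : Int) 1 = ((m &&& 1 : Nat) : Int) := by
        exact_mod_cast PySem.Int.band_natCast m 1
      rw [hs, hb, ih (m / 2) (by omega)]
      rw [List.range_succ_eq_map, List.map_cons, List.map_map, List.sum_cons]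
      have hcong : ∀ i : Nat,
          ((fun i => if m.testBit i then (1 : Int) else 0) ∘ (fun i => i + 1)) i
          = (fun i => if (m / 2).testBit i then (1 : Int) else 0) i := by
        intro i
        simp [Function.comp, Nat.testBit_add_one]
      rw [List.map_congr_left (fun i _ => hcong i)]
      have h01 : m &&& 1 = m % 2 := Nat.and_one_is_mod m
      rw [Nat.testBit_zero, h01]
      have h2 : m % 2 = 0 ∨ m % 2 = 1 := by omega
      rcases h2 with h2 | h2 <;> simp [h2] <;> ring

-- the final reduction: A's parity scan over 26 slots equals the popcount of B's mask
theorem pvCount (freq : List Int) (m : Nat) (h : pvInv freq m) :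
    ((PySem.List.pyRange 0 26 1).map
      (fun i => if PySem.Int.band (PySem.List.pyGetD freq i 0) 1 ≠ 0 then (1 : Int) else 0)).sum
      = pvPop (m : Int) 0 := by
  obtain ⟨hlen, hpos, hpar, hlt⟩ := h
  rw [pvPop_eq 26 m hlt 0, zero_add,
      show (26:Int) = ((26:Nat):Int) from rfl, PySem.List.pyRange_zero_natCast, List.map_map]
  congr 1
  apply List.map_congr_left
  intro i hi
  have hi26 : i < 26 := List.mem_range.mp hi
  have hb : PySem.Int.band (PySem.List.pyGetD freq ((i : Nat) : Int) 0) 1 = freq.getD i 0 % 2 := by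
    rw [PySem.List.pyGetD_natCast, PySem.Int.band_one,
        PySem.Int.mod_eq_emod_of_pos (by omega : (0:Int) < 2)]
  simp only [Function.comp, hb]
  have h1 := hpar i hi26
  by_cases hm : m.testBit i
  · have hodd := h1.mpr hm
    rw [if_pos (by omega), if_pos hm]
  · have hne : freq.getD i 0 % 2 ≠ 1 := fun hh => hm (h1.mp hh)
    have hp := hpos i hi26
    rw [if_neg (by omega), if_neg hm]

-- ===== VERDICT (by name: the statement is the Claim_ definition above) =====
theorem countOddLetters_spec : Claim_equal_countOddLetters := by
  intro n _
  unfold Spec_countOddLetters countOddLetters countOddLetters_alt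
  obtain ⟨m', hB, hinv⟩ := pvLoop n.toNat n (le_refl _) (List.replicate 26 0) 0 pvInv_init
  have hB' : pvLoopB n 0 = (m' : Int) := by exact_mod_cast hB
  rw [hB']
  exact pvCount _ _ hinv
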